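-- pv_equiv track=rewrite | github.com/jairodavidperdomogarcia/cybersentinel-academy | LIBRO_BORRADOR/volumen_01/parte_05_profesional/capitulo_16_grc_etica/compliance_auditor.py | build_failed_controls
-- ===== SOURCE A (Python) =====
-- def build_failed_controls(report_lines):
--     controls = set()
--     for line in report_lines:
--         if "FAIL" not in line:
--             continue
--         lower = line.lower()
--         if "root login" in lower:
--             controls.add("SSH_ROOT_LOGIN")
--         if "password" in lower and "auth" in lower:
--             controls.add("SSH_PASSWORD_AUTH")
--         if "777" in lower:
--             controls.add("WEB_PERMISSIONS_777")
--         if "firewall" in lower: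
--             controls.add("FIREWALL_INACTIVE")
--     return sorted(controls)
-- ===== SOURCE B (Python) =====
-- RULES = [
--     ("FIREWALL_INACTIVE", lambda l: "firewall" in l),
--     ("SSH_PASSWORD_AUTH", lambda l: "password" in l and "auth" in l),
--     ("SSH_ROOT_LOGIN", lambda l: "root login" in l),
--     ("WEB_PERMISSIONS_777", lambda l: "777" in l),
-- ]
--
-- def build_failed_controls(report_lines):
--     failing = [line.lower() for line in report_lines if "FAIL" in line]
--     return [cid for cid, pred in RULES if any(pred(l) for l in failing)]
-- ===== Notes on version B (the rewrite author's own statement) =====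
-- stated objective: alternative
-- what changed: Inverts the loop structure: instead of scanning lines and accumulating a set that is sorted at the end, B iterates a rule table already in sorted output order and emits each control id if any failing (lowercased) line satisfies its predicate, so no set and no sort are needed.
import Mathlib
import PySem

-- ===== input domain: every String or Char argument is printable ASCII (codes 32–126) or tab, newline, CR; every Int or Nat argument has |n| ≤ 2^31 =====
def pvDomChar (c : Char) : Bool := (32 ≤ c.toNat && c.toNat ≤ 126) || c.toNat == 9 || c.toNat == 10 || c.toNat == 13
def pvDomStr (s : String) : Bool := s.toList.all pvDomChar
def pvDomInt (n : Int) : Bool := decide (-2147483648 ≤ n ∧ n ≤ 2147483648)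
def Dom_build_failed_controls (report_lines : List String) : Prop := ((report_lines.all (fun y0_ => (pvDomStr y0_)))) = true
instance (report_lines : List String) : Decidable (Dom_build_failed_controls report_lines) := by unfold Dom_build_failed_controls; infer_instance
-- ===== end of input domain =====

-- B replaces A's line-scan-into-a-set-then-sort by a scan over a rule table in sorted
-- output order, emitting each control id iff some failing lowercased line matches ('alternative').

-- ===== PORT A =====
-- 'if cond: controls.add(v)' as a helper
def bfc_addIf (b : Bool) (s : PySem.Set String) (v : String) : PySem.Set String :=
  if b then s.add v else s

def bfc_step (controls : PySem.Set String) (line : String) : PySem.Set String :=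
  if !(PySem.Str.isIn "FAIL" line) then controls
  else
    let lower := PySem.Str.lower line
    bfc_addIf (PySem.Str.isIn "firewall" lower)
      (bfc_addIf (PySem.Str.isIn "777" lower)
        (bfc_addIf (PySem.Str.isIn "password" lower && PySem.Str.isIn "auth" lower)
          (bfc_addIf (PySem.Str.isIn "root login" lower) controls "SSH_ROOT_LOGIN")
          "SSH_PASSWORD_AUTH")
        "WEB_PERMISSIONS_777")
      "FIREWALL_INACTIVE"

def build_failed_controls (report_lines : List String) : List String :=
  PySem.List.sorted (report_lines.foldl bfc_step PySem.Set.empty) (fun x => x) false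

-- ===== PORT B =====
def bfc_rules : List (String × (String → Bool)) :=
  [("FIREWALL_INACTIVE", fun l => PySem.Str.isIn "firewall" l),
   ("SSH_PASSWORD_AUTH", fun l => PySem.Str.isIn "password" l && PySem.Str.isIn "auth" l),
   ("SSH_ROOT_LOGIN", fun l => PySem.Str.isIn "root login" l),
   ("WEB_PERMISSIONS_777", fun l => PySem.Str.isIn "777" l)]

def build_failed_controls_alt (report_lines : List String) : List String :=
  let failing := (report_lines.filter (fun line => PySem.Str.isIn "FAIL" line)).map PySem.Str.lower
  (bfc_rules.filter (fun r => failing.any r.2)).map (fun r => r.1)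

-- ===== PRECONDITION & SPEC =====
def Spec_build_failed_controls (report_lines : List String) (out : List String) : Prop := out = build_failed_controls_alt report_lines
instance (report_lines : List String) (out : List String) : Decidable (Spec_build_failed_controls report_lines out) := by unfold Spec_build_failed_controls; infer_instance

-- ===== CLAIM (what is proved, stated in full; the proofs are below) =====
def Claim_equal_build_failed_controls : Prop := ∀ (report_lines : List String), Dom_build_failed_controls report_lines → Spec_build_failed_controls report_lines (build_failed_controls report_lines)

-- ===== LEMMAS AND PROOFS =====

lemma bfc_or_shuffle (S A1 A2 A3 A4 B1 B2 B3 B4 : Prop) :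
    ((S ∨ A1 ∨ A2 ∨ A3 ∨ A4) ∨ B1 ∨ B2 ∨ B3 ∨ B4) ↔
      (S ∨ (A1 ∨ B1) ∨ (A2 ∨ B2) ∨ (A3 ∨ B3) ∨ (A4 ∨ B4)) := by
  tauto

-- shorthand: 'some failing line of lines matches pred' as a Bool over the raw lines
def bfc_hit (lines : List String) (pred : String → Bool) : Bool :=
  lines.any (fun l => PySem.Str.isIn "FAIL" l && pred (PySem.Str.lower l))

lemma bfc_mem_addIf (b : Bool) (s : PySem.Set String) (v x : String) :
    x ∈ bfc_addIf b s v ↔ x ∈ s ∨ (x = v ∧ b = true) := by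
  cases b <;> simp [bfc_addIf, PySem.Set.mem_add, and_comm]

lemma bfc_nodup_addIf (b : Bool) (s : PySem.Set String) (v : String) (hs : s.Nodup) :
    (bfc_addIf b s v).Nodup := by
  cases b
  · exact hs
  · exact PySem.Set.nodup_add s v hs

lemma bfc_mem_step (s : PySem.Set String) (line x : String) :
    x ∈ bfc_step s line ↔ x ∈ s ∨
      (x = "SSH_ROOT_LOGIN" ∧ (PySem.Str.isIn "FAIL" line && PySem.Str.isIn "root login" (PySem.Str.lower line)) = true) ∨
      (x = "SSH_PASSWORD_AUTH" ∧ (PySem.Str.isIn "FAIL" line && (PySem.Str.isIn "password" (PySem.Str.lower line) && PySem.Str.isIn "auth" (PySem.Str.lower line))) = true) ∨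
      (x = "WEB_PERMISSIONS_777" ∧ (PySem.Str.isIn "FAIL" line && PySem.Str.isIn "777" (PySem.Str.lower line)) = true) ∨
      (x = "FIREWALL_INACTIVE" ∧ (PySem.Str.isIn "FAIL" line && PySem.Str.isIn "firewall" (PySem.Str.lower line)) = true) := by
  by_cases hF : PySem.Str.isIn "FAIL" line = true
  · have hstep : bfc_step s line =
        bfc_addIf (PySem.Str.isIn "firewall" (PySem.Str.lower line))
          (bfc_addIf (PySem.Str.isIn "777" (PySem.Str.lower line))
            (bfc_addIf (PySem.Str.isIn "password" (PySem.Str.lower line) && PySem.Str.isIn "auth" (PySem.Str.lower line))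
              (bfc_addIf (PySem.Str.isIn "root login" (PySem.Str.lower line)) s "SSH_ROOT_LOGIN")
              "SSH_PASSWORD_AUTH")
            "WEB_PERMISSIONS_777")
          "FIREWALL_INACTIVE" := by
      unfold bfc_step; rw [hF]; rfl
    rw [hstep, hF]
    simp only [bfc_mem_addIf, Bool.true_and, or_assoc]
  · rw [Bool.not_eq_true] at hF
    have hstep : bfc_step s line = s := by unfold bfc_step; rw [hF]; rfl
    rw [hstep, hF]
    simp only [Bool.false_and, Bool.false_eq_true, and_false, or_false]

lemma bfc_mem_fold (lines : List String) (s : PySem.Set String) (x : String) :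
    x ∈ lines.foldl bfc_step s ↔ x ∈ s ∨
      (x = "SSH_ROOT_LOGIN" ∧ bfc_hit lines (fun l => PySem.Str.isIn "root login" l) = true) ∨
      (x = "SSH_PASSWORD_AUTH" ∧ bfc_hit lines (fun l => PySem.Str.isIn "password" l && PySem.Str.isIn "auth" l) = true) ∨
      (x = "WEB_PERMISSIONS_777" ∧ bfc_hit lines (fun l => PySem.Str.isIn "777" l) = true) ∨
      (x = "FIREWALL_INACTIVE" ∧ bfc_hit lines (fun l => PySem.Str.isIn "firewall" l) = true) := by
  induction lines generalizing s with
  | nil => simp [bfc_hit]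
  | cons hd tl ih =>
    rw [List.foldl_cons, ih, bfc_mem_step]
    simp only [bfc_hit, List.any_cons, Bool.or_eq_true, and_or_left]
    exact bfc_or_shuffle _ _ _ _ _ _ _ _ _

lemma bfc_nodup_fold (lines : List String) (s : PySem.Set String) (hs : s.Nodup) :
    (lines.foldl bfc_step s).Nodup := by
  induction lines generalizing s with
  | nil => exact hs
  | cons hd tl ih =>
    refine ih _ ?_
    unfold bfc_step
    split_ifs with h
    · exact hs
    · exact bfc_nodup_addIf _ _ _ (bfc_nodup_addIf _ _ _ (bfc_nodup_addIf _ _ _ (bfc_nodup_addIf _ _ _ hs)))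

lemma bfc_alt_mem (lines : List String) (x : String) :
    x ∈ build_failed_controls_alt lines ↔
      (x = "SSH_ROOT_LOGIN" ∧ bfc_hit lines (fun l => PySem.Str.isIn "root login" l) = true) ∨
      (x = "SSH_PASSWORD_AUTH" ∧ bfc_hit lines (fun l => PySem.Str.isIn "password" l && PySem.Str.isIn "auth" l) = true) ∨
      (x = "WEB_PERMISSIONS_777" ∧ bfc_hit lines (fun l => PySem.Str.isIn "777" l) = true) ∨
      (x = "FIREWALL_INACTIVE" ∧ bfc_hit lines (fun l => PySem.Str.isIn "firewall" l) = true) := by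
  simp only [build_failed_controls_alt, bfc_rules, bfc_hit, List.any_map, List.any_filter,
    List.mem_map, List.mem_filter]
  constructor
  · rintro ⟨r, hr, rfl⟩
    simp only [List.mem_cons, List.not_mem_nil, or_false] at hr
    rcases hr with ⟨rfl | rfl | rfl | rfl, hh⟩ <;>
      simp_all [Function.comp]
  · rintro (⟨rfl, h⟩ | ⟨rfl, h⟩ | ⟨rfl, h⟩ | ⟨rfl, h⟩) <;>
      [ refine ⟨("SSH_ROOT_LOGIN", fun l => PySem.Str.isIn "root login" l), ?_, rfl⟩;
        refine ⟨("SSH_PASSWORD_AUTH", fun l => PySem.Str.isIn "password" l && PySem.Str.isIn "auth" l), ?_, rfl⟩;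
        refine ⟨("WEB_PERMISSIONS_777", fun l => PySem.Str.isIn "777" l), ?_, rfl⟩;
        refine ⟨("FIREWALL_INACTIVE", fun l => PySem.Str.isIn "firewall" l), ?_, rfl⟩ ] <;>
      simp_all [Function.comp]

lemma bfc_alt_sublist (lines : List String) :
    (build_failed_controls_alt lines).Sublist (bfc_rules.map (fun r => r.1)) := by
  exact List.Sublist.map _ (List.filter_sublist)

lemma bfc_alt_nodup (lines : List String) : (build_failed_controls_alt lines).Nodup := by
  refine List.Nodup.sublist (bfc_alt_sublist lines) ?_
  simp [bfc_rules]

lemma bfc_alt_pairwise (lines : List String) :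
    (build_failed_controls_alt lines).Pairwise (fun a b => a < b) := by
  refine List.Pairwise.sublist (bfc_alt_sublist lines) ?_
  simp only [bfc_rules, List.map_cons, List.map_nil]
  simp only [List.pairwise_cons, List.mem_cons, List.not_mem_nil, List.Pairwise.nil,
    or_false, forall_eq_or_imp, forall_eq, false_imp_iff, imp_true_iff, and_true]
  refine ⟨⟨?_, ?_, ?_⟩, ⟨?_, ?_⟩, ?_⟩ <;> (rw [String.lt_iff_toList_lt]; decide)

-- ===== VERDICT (by name: the statement is the Claim_ definition above) =====
theorem build_failed_controls_spec : Claim_equal_build_failed_controls := by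
  intro lines _
  show build_failed_controls lines = build_failed_controls_alt lines
  unfold build_failed_controls
  refine PySem.List.sorted_eq_of_perm_of_pairwise_lt _ _ _ ?_ (bfc_alt_pairwise lines)
  refine (List.perm_ext_iff_of_nodup (bfc_alt_nodup lines)
    (bfc_nodup_fold lines PySem.Set.empty (by simp [PySem.Set.empty]))).mpr ?_
  intro x
  rw [bfc_alt_mem, bfc_mem_fold]
  simp [PySem.Set.empty]
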